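-- pv_equiv track=rewrite | github.com/stella-etoile/libambi | ambi/refinement.py | _cell_splits
-- ===== SOURCE A (Python) =====
-- def _cell_splits(n: int, g: int):
--     """Split a length n into g nearly-equal segments; returns boundaries [0, ..., n]."""
--     # Example: n=33,g=4 -> [0, 8, 17, 25, 33]
--     base = n // g
--     extra = n % g
--     sizes = [base + (1 if i < extra else 0) for i in range(g)]
--     bounds = [0]
--     acc = 0
--     for s in sizes:
--         acc += s
--         bounds.append(acc)
--     return bounds
-- ===== SOURCE B (Python) =====
-- def _cell_splits(n: int, g: int):
--     """Split a length n into g nearly-equal segments; returns boundaries [0, ..., n]."""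
--     base, extra = divmod(n, g)
--     return [i * base + min(i, extra) for i in range(g + 1)]
-- ===== Notes on version B (the rewrite author's own statement) =====
-- stated objective: simpler
-- what changed: Each boundary is computed directly by the closed form i*base + min(i, extra) in a single comprehension, instead of building a sizes list and accumulating a running sum; Pre_ restricts to positive segment counts g >= 1 (g = 0 raises in both, negative g is outside the function's purpose).
-- outside the precondition, e.g. on _cell_splits(7, -3): A returns [0], B returns []; on _cell_splits(-1, -1): A returns [0], B returns []
import Mathlib
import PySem

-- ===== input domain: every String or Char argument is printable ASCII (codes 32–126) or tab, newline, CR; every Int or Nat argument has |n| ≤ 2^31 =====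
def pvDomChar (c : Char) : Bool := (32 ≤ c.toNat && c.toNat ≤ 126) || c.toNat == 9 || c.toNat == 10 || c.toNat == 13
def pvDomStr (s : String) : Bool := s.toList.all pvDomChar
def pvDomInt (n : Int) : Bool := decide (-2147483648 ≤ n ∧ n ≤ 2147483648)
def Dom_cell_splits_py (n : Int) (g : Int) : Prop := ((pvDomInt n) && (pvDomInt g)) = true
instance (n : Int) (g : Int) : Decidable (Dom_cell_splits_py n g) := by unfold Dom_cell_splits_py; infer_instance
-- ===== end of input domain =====

-- B computes each boundary directly with the closed form i*base + min(i, extra) (simpler: no sizes list, no accumulator).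

-- ===== PORT A =====
def cell_splits_py (n : Int) (g : Int) : List Int :=
  let base := PySem.Int.floordiv n g
  let extra := PySem.Int.mod n g
  let sizes := (PySem.List.pyRange 0 g 1).map (fun i => base + (if i < extra then 1 else 0))
  (sizes.foldl (fun (st : List Int × Int) s => (st.1 ++ [st.2 + s], st.2 + s)) (([0] : List Int), (0 : Int))).1

-- ===== PORT B =====
def cell_splits_py_alt (n : Int) (g : Int) : List Int :=
  let base := PySem.Int.floordiv n g
  let extra := PySem.Int.mod n g
  (PySem.List.pyRange 0 (g + 1) 1).map (fun i => i * base + min i extra)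

-- ===== PRECONDITION & SPEC =====
-- Pre_ restricts to the task's natural domain, a positive segment count g: g = 0 raises
-- ZeroDivisionError in both programs, and a negative number of segments is outside the function's
-- purpose (neither A's [0] nor B's [] is a list of boundaries ending at n there).
def Pre_cell_splits_py (n : Int) (g : Int) : Prop := 1 ≤ g
instance (n : Int) (g : Int) : Decidable (Pre_cell_splits_py n g) := by unfold Pre_cell_splits_py; infer_instance

def pvWitness_cell_splits_py : Int × Int := (33, 4)

def Spec_cell_splits_py (n : Int) (g : Int) (out : List Int) : Prop := out = cell_splits_py_alt n g
instance (n : Int) (g : Int) (out : List Int) : Decidable (Spec_cell_splits_py n g out) := by unfold Spec_cell_splits_py; infer_instance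

-- ===== CLAIM (what is proved, stated in full; the proofs are below) =====
def Claim_equal_cell_splits_py : Prop := ∀ (n : Int) (g : Int), Dom_cell_splits_py n g → Pre_cell_splits_py n g → Spec_cell_splits_py n g (cell_splits_py n g)

-- ===== LEMMAS AND PROOFS =====

-- prefix sums starting from accumulator a (the values successively appended by A's loop)
def pvPsums (a : Int) : List Int → List Int
  | [] => []
  | s :: t => (a + s) :: pvPsums (a + s) t

theorem pvPsums_foldl (l : List Int) (bs : List Int) (a : Int) :
    (l.foldl (fun (st : List Int × Int) s => (st.1 ++ [st.2 + s], st.2 + s)) (bs, a)).1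
      = bs ++ pvPsums a l := by
  induction l generalizing bs a with
  | nil => simp [pvPsums]
  | cons s t ih => simp [pvPsums, ih]

theorem pvPsums_append (l : List Int) (x a : Int) :
    pvPsums a (l ++ [x]) = pvPsums a l ++ [a + l.sum + x] := by
  induction l generalizing a with
  | nil => simp [pvPsums]
  | cons s t ih => simp [pvPsums, ih]; ring_nf

theorem pvSum_sizes (base extra : Int) (m : Nat) :
    ((List.range m).map (fun k : Nat => base + (if (k : Int) < extra then 1 else 0))).sum
      = (m : Int) * base + min (m : Int) extra - min 0 extra := by
  induction m with
  | zero => simp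
  | succ m ih =>
    rw [List.range_succ, List.map_append, List.sum_append, ih]
    simp only [List.map_cons, List.map_nil, List.sum_cons, List.sum_nil]
    have hm1 : ((m + 1 : Nat) : Int) = (m : Int) + 1 := by push_cast; ring
    rcases Int.lt_or_le (m : Int) extra with h | h
    · rw [if_pos h, min_eq_left (by omega : (m : Int) ≤ extra), hm1,
          min_eq_left (by omega : (m : Int) + 1 ≤ extra)]
      ring
    · rw [if_neg (not_lt.mpr h), min_eq_right h, hm1,
          min_eq_right (by omega : extra ≤ (m : Int) + 1)]
      ring

theorem pvKey (base extra : Int) (h0 : 0 ≤ extra) (m : Nat) :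
    (0 : Int) :: pvPsums 0 ((List.range m).map (fun k : Nat => base + (if (k : Int) < extra then 1 else 0)))
      = (List.range (m + 1)).map (fun k : Nat => (k : Int) * base + min (k : Int) extra) := by
  induction m with
  | zero => simp [pvPsums, min_eq_left h0]
  | succ m ih =>
    rw [List.range_succ (n := m + 1), List.map_append,
        List.range_succ (n := m), List.map_append]
    simp only [List.map_cons, List.map_nil]
    rw [pvPsums_append, pvSum_sizes]
    have hm1 : ((m + 1 : Nat) : Int) = (m : Int) + 1 := by push_cast; ring
    have : ((0 : Int) + ((m : Int) * base + min (m : Int) extra - min 0 extra)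
        + (base + (if (m : Int) < extra then 1 else 0)))
        = ((m + 1 : Nat) : Int) * base + min ((m + 1 : Nat) : Int) extra := by
      rw [min_eq_left h0, hm1]
      rcases Int.lt_or_le (m : Int) extra with h | h
      · rw [if_pos h, min_eq_left (by omega : (m : Int) ≤ extra),
            min_eq_left (by omega : (m : Int) + 1 ≤ extra)]
        ring
      · rw [if_neg (not_lt.mpr h), min_eq_right h,
            min_eq_right (by omega : extra ≤ (m : Int) + 1)]
        ring
    rw [this]
    rw [← List.cons_append, ih, List.range_succ]

-- ===== VERDICT (by name: the statement is the Claim_ definition above) =====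
theorem cell_splits_py_spec : Claim_equal_cell_splits_py := by
  intro n g _ hg
  unfold Spec_cell_splits_py cell_splits_py cell_splits_py_alt
  have hgpos : (0 : Int) < g := hg
  have hext : 0 ≤ PySem.Int.mod n g := PySem.Int.mod_nonneg n hgpos
  rw [pvPsums_foldl]
  obtain ⟨m, rfl⟩ : ∃ m : Nat, g = (m : Int) := ⟨g.toNat, (Int.toNat_of_nonneg hgpos.le).symm⟩
  rw [PySem.List.pyRange_one, PySem.List.pyRange_one]
  have h1 : ((m : Int) - 0).toNat = m := by omega
  have h2 : ((m : Int) + 1 - 0).toNat = m + 1 := by omega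
  rw [h1, h2]
  simp only [List.map_map, Function.comp_def, zero_add, List.singleton_append]
  exact pvKey _ _ hext m
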